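-- pv_equiv track=rewrite | github.com/yosefabush/GenAIMarketplace | backend/app/services/search.py | _prepare_query_postgres
-- ===== SOURCE A (Python) =====
-- from typing import Optional
--
-- def _prepare_query_postgres(query: str) -> Optional[str]:
--     """Prepare a search query for PostgreSQL tsquery."""
--     query = query.strip()
--     if not query:
--         return None
--
--     words = [word.strip() for word in query.split() if word.strip()]
--
--     if not words:
--         return None
--
--     # Escape special characters and join with AND operator
--     escaped_words = []
--     for word in words:
--         # Remove characters that could break tsquery
--         cleaned = ''.join(c for c in word if c.isalnum())
--         if cleaned:
--             escaped_words.append(cleaned)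
--
--     if not escaped_words:
--         return None
--
--     return " & ".join(escaped_words)
-- ===== SOURCE B (Python) =====
-- from typing import Optional
--
-- def _prepare_query_postgres(query: str) -> Optional[str]:
--     """Prepare a search query for PostgreSQL tsquery."""
--     cleaned = ''.join(c for c in query if c.isalnum() or c.isspace())
--     tokens = cleaned.split()
--     if not tokens:
--         return None
--     return " & ".join(tokens)
-- ===== Notes on version B (the rewrite author's own statement) =====
-- stated objective: simpler
-- what changed: B inverts A's pass order: one global character filter keeping alnum-or-space chars over the whole string, then a single split(), replacing A's strip/split/per-word-strip/per-word-filter/append pipeline and its three early-return checks with one emptiness check.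
import Mathlib
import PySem

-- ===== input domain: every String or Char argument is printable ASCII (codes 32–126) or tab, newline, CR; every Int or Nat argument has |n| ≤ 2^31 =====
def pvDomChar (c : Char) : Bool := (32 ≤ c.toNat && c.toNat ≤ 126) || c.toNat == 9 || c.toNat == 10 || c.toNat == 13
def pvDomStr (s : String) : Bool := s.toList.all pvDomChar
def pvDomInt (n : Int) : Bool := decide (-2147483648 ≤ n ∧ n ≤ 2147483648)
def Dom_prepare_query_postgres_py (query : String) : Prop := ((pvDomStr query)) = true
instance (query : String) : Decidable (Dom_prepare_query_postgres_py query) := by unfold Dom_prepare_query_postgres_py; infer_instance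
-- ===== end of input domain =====

-- B filters the whole string once (keeping alnum/space chars) and then splits, instead of
-- A's split-then-per-word-filter pipeline; objective: simpler (same asymptotic cost).

-- ===== PORT A =====
def prepare_query_postgres_py (query : String) : Option String :=
  let q := PySem.Chars.strip query.toList
  if q.isEmpty then none
  else
    let words := ((PySem.Chars.split₀ q).map PySem.Chars.strip).filter (fun w => !w.isEmpty)
    if words.isEmpty then none
    else
      let escaped := words.foldl (fun acc w =>
        let cleaned := w.filter PySem.Chars.isalnum
        if cleaned.isEmpty then acc else acc ++ [cleaned]) []
      if escaped.isEmpty then none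
      else some (String.ofList (PySem.Chars.join " & ".toList escaped))

-- ===== PORT B =====
def prepare_query_postgres_py_alt (query : String) : Option String :=
  let cleaned := query.toList.filter (fun c => PySem.Chars.isalnum c || PySem.Chars.isspace c)
  let tokens := PySem.Chars.split₀ cleaned
  if tokens.isEmpty then none
  else some (String.ofList (PySem.Chars.join " & ".toList tokens))

-- ===== PRECONDITION & SPEC =====
def Spec_prepare_query_postgres_py (query : String) (out : Option String) : Prop := out = prepare_query_postgres_py_alt query
instance (query : String) (out : Option String) : Decidable (Spec_prepare_query_postgres_py query out) := by unfold Spec_prepare_query_postgres_py; infer_instance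

-- ===== CLAIM (what is proved, stated in full; the proofs are below) =====
def Claim_equal_prepare_query_postgres_py : Prop := ∀ (query : String), Dom_prepare_query_postgres_py query → Spec_prepare_query_postgres_py query (prepare_query_postgres_py query)

-- ===== LEMMAS AND PROOFS =====

-- split₀.go with an accumulator equals the accumulator (reversed) prepended to the run with empty accumulator
theorem go_acc (s cur : List Char) (acc : List (List Char)) :
    PySem.Chars.split₀.go s cur acc = acc.reverse ++ PySem.Chars.split₀.go s cur [] := by
  induction s generalizing cur acc with
  | nil => simp [PySem.Chars.split₀.go]; split <;> simp
  | cons c rest ih =>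
    simp only [PySem.Chars.split₀.go]
    split
    · split
      · exact ih [] acc
      · rw [ih [] (cur.reverse :: acc), ih [] [cur.reverse]]; simp
    · exact ih (c :: cur) acc

-- running go over only-whitespace input just flushes the current word
theorem go_spaces (t cur : List Char) (acc : List (List Char)) (h : ∀ c ∈ t, PySem.Chars.isspace c = true) :
    PySem.Chars.split₀.go t cur acc =
      if cur.isEmpty then acc.reverse else (cur.reverse :: acc).reverse := by
  induction t generalizing cur acc with
  | nil => simp [PySem.Chars.split₀.go]
  | cons c rest ih =>
    have hc : PySem.Chars.isspace c = true := h c (by simp)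
    simp only [PySem.Chars.split₀.go, hc, if_true]
    split
    · rw [ih [] acc (fun c hm => h c (by simp [hm]))]; simp
    · rw [ih [] (cur.reverse :: acc) (fun c hm => h c (by simp [hm]))]; simp

-- trailing whitespace does not change go
theorem go_append_spaces (s t cur : List Char) (acc : List (List Char)) (h : ∀ c ∈ t, PySem.Chars.isspace c = true) :
    PySem.Chars.split₀.go (s ++ t) cur acc = PySem.Chars.split₀.go s cur acc := by
  induction s generalizing cur acc with
  | nil => rw [List.nil_append, go_spaces t cur acc h]; simp [PySem.Chars.split₀.go]
  | cons c rest ih =>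
    simp only [List.cons_append, PySem.Chars.split₀.go]
    split
    · split
      · exact ih [] acc
      · exact ih [] (cur.reverse :: acc)
    · exact ih (c :: cur) acc

theorem split₀_rstrip (s : List Char) :
    PySem.Chars.split₀ (PySem.Chars.rstrip s) = PySem.Chars.split₀ s := by
  unfold PySem.Chars.split₀ PySem.Chars.rstrip
  conv_rhs => rw [show s = (s.reverse.dropWhile PySem.Chars.isspace).reverse ++
      (s.reverse.takeWhile PySem.Chars.isspace).reverse by
    rw [← List.reverse_append, List.takeWhile_append_dropWhile, List.reverse_reverse]]
  rw [go_append_spaces]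
  intro c hm
  exact List.mem_takeWhile_imp (by simpa using hm)

theorem split₀_lstrip (s : List Char) :
    PySem.Chars.split₀ (PySem.Chars.lstrip s) = PySem.Chars.split₀ s := by
  unfold PySem.Chars.lstrip
  induction s with
  | nil => simp
  | cons c rest ih =>
    by_cases hc : PySem.Chars.isspace c = true
    · rw [List.dropWhile_cons_of_pos hc]
      rw [ih]
      simp [PySem.Chars.split₀, PySem.Chars.split₀.go, hc]
    · rw [List.dropWhile_cons_of_neg (by simp [hc])]

theorem split₀_strip (s : List Char) :
    PySem.Chars.split₀ (PySem.Chars.strip s) = PySem.Chars.split₀ s := by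
  unfold PySem.Chars.strip
  rw [split₀_rstrip, split₀_lstrip]

-- every word produced by go (from a good state) is nonempty and whitespace-free
theorem mem_go (s cur : List Char) (acc : List (List Char)) (w : List Char)
    (hacc : ∀ w ∈ acc, w ≠ [] ∧ ∀ c ∈ w, PySem.Chars.isspace c = false)
    (hcur : ∀ c ∈ cur, PySem.Chars.isspace c = false)
    (hw : w ∈ PySem.Chars.split₀.go s cur acc) :
    w ≠ [] ∧ ∀ c ∈ w, PySem.Chars.isspace c = false := by
  induction s generalizing cur acc with
  | nil =>
    simp only [PySem.Chars.split₀.go] at hw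
    split at hw
    · exact hacc w (by simpa using hw)
    · rename_i hne
      simp only [List.reverse_cons] at hw
      rcases (by simpa using hw : w ∈ acc ∨ w = cur.reverse) with h1 | h2
      · exact hacc w h1
      · have : w = cur.reverse := h2
        subst this
        constructor
        · simp only [ne_eq, List.reverse_eq_nil_iff]
          intro hnil; rw [hnil] at hne; simp at hne
        · intro c hc; exact hcur c (List.mem_reverse.mp hc)
  | cons c rest ih =>
    simp only [PySem.Chars.split₀.go] at hw
    split at hw
    · rename_i hsp
      split at hw
      · exact ih [] acc hacc (by simp) hw
      · rename_i hne
        refine ih [] (cur.reverse :: acc) ?_ (by simp) hw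
        intro v hv
        rcases List.mem_cons.mp hv with h1 | h2
        · subst h1
          refine ⟨by simp_all, fun d hd => hcur d (List.mem_reverse.mp hd)⟩
        · exact hacc v h2
    · rename_i hsp
      refine ih (c :: cur) acc hacc ?_ hw
      intro d hd
      rcases List.mem_cons.mp hd with h1 | h2
      · subst h1; simpa using hsp
      · exact hcur d h2

theorem strip_of_no_space (w : List Char) (h : ∀ c ∈ w, PySem.Chars.isspace c = false) :
    PySem.Chars.strip w = w := by
  have hl : ∀ (v : List Char), (∀ c ∈ v, PySem.Chars.isspace c = false) →
      v.dropWhile PySem.Chars.isspace = v := by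
    intro v hv
    cases v with
    | nil => simp
    | cons c t => rw [List.dropWhile_cons_of_neg (by simp [hv c (by simp)])]
  unfold PySem.Chars.strip PySem.Chars.rstrip PySem.Chars.lstrip
  rw [hl w h, hl w.reverse (fun c hc => h c (List.mem_reverse.mp hc)), List.reverse_reverse]

-- A's escaped_words loop is map-filter
theorem escaped_foldl (ws : List (List Char)) (acc : List (List Char)) :
    ws.foldl (fun acc w =>
        let cleaned := w.filter PySem.Chars.isalnum
        if cleaned.isEmpty then acc else acc ++ [cleaned]) acc
      = acc ++ (ws.map (fun w => w.filter PySem.Chars.isalnum)).filter (fun w => !w.isEmpty) := by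
  induction ws generalizing acc with
  | nil => simp
  | cons w rest ih =>
    by_cases hw : (w.filter PySem.Chars.isalnum).isEmpty = true
    · simp only [List.foldl_cons, List.map_cons, List.filter_cons, hw, Bool.not_true,
        if_true, Bool.false_eq_true, if_false, ih]
    · rw [Bool.not_eq_true] at hw
      simp only [List.foldl_cons, List.map_cons, List.filter_cons, hw, Bool.not_false,
        Bool.false_eq_true, if_false, if_true, ih]
      simp

-- the core: filtering the string first, then splitting, equals splitting then per-word filtering
theorem go_filter (s cur : List Char) :
    PySem.Chars.split₀.go
        (s.filter (fun c => PySem.Chars.isalnum c || PySem.Chars.isspace c))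
        (cur.filter PySem.Chars.isalnum) []
      = ((PySem.Chars.split₀.go s cur []).map (fun w => w.filter PySem.Chars.isalnum)).filter
          (fun w => !w.isEmpty) := by
  induction s generalizing cur with
  | nil =>
    simp only [List.filter_nil, PySem.Chars.split₀.go]
    by_cases hc : cur.isEmpty = true
    · have : cur = [] := by simpa [List.isEmpty_iff] using hc
      subst this; simp
    · rw [Bool.not_eq_true] at hc
      by_cases hf : (cur.filter PySem.Chars.isalnum).isEmpty = true
      · simp only [hc, hf, Bool.false_eq_true, if_false, if_true]
        simp [List.filter_reverse, List.isEmpty_iff.mp hf]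
      · rw [Bool.not_eq_true] at hf
        simp only [hc, hf, Bool.false_eq_true, if_false]
        simp [List.filter_reverse, List.isEmpty_reverse, hf]
  | cons c rest ih =>
    by_cases hsp : PySem.Chars.isspace c = true
    · simp only [List.filter_cons, hsp, Bool.or_true, if_true]
      simp only [PySem.Chars.split₀.go, hsp, if_true]
      by_cases hcur : cur.isEmpty = true
      · have hcnil : cur = [] := by simpa [List.isEmpty_iff] using hcur
        subst hcnil
        simpa using ih []
      · rw [Bool.not_eq_true] at hcur
        simp only [hcur, Bool.false_eq_true, if_false]
        by_cases hf : (cur.filter PySem.Chars.isalnum).isEmpty = true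
        · simp only [hf, if_true]
          rw [go_acc rest [] [cur.reverse]]
          have h0 := ih ([] : List Char)
          simp only [List.filter_nil] at h0
          rw [h0]
          simp [List.filter_reverse, List.isEmpty_iff.mp hf]
        · rw [Bool.not_eq_true] at hf
          simp only [hf, Bool.false_eq_true, if_false]
          rw [go_acc _ [] [(cur.filter PySem.Chars.isalnum).reverse],
              go_acc rest [] [cur.reverse]]
          have h0 := ih ([] : List Char)
          simp only [List.filter_nil] at h0
          rw [h0]
          simp [List.filter_reverse, List.isEmpty_reverse, hf]
    · rw [Bool.not_eq_true] at hsp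
      by_cases hal : PySem.Chars.isalnum c = true
      · simp only [List.filter_cons, hal, Bool.true_or, if_true]
        simp only [PySem.Chars.split₀.go, hsp, Bool.false_eq_true, if_false]
        have hcc : c :: cur.filter PySem.Chars.isalnum
            = (c :: cur).filter PySem.Chars.isalnum := by
          simp [hal]
        rw [hcc, ih (c :: cur)]
      · rw [Bool.not_eq_true] at hal
        simp only [List.filter_cons, hal, hsp, Bool.or_self, Bool.false_eq_true, if_false]
        simp only [PySem.Chars.split₀.go, hsp, Bool.false_eq_true, if_false]
        have hcc : cur.filter PySem.Chars.isalnum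
            = (c :: cur).filter PySem.Chars.isalnum := by
          simp [hal]
        rw [hcc, ih (c :: cur)]

-- ===== VERDICT (by name: the statement is the Claim_ definition above) =====
theorem prepare_query_postgres_py_spec : Claim_equal_prepare_query_postgres_py := by
  intro query _
  unfold Spec_prepare_query_postgres_py prepare_query_postgres_py prepare_query_postgres_py_alt
  set q := query.toList with hq
  have hwords : ∀ w ∈ PySem.Chars.split₀ q,
      w ≠ [] ∧ ∀ c ∈ w, PySem.Chars.isspace c = false := by
    intro w hw
    exact mem_go q [] [] w (by simp) (by simp) hw
  have hmap : (PySem.Chars.split₀ (PySem.Chars.strip q)).map PySem.Chars.strip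
      = PySem.Chars.split₀ q := by
    rw [split₀_strip]
    rw [List.map_congr_left (fun w hw => strip_of_no_space w (hwords w hw).2)]
    simp
  have hfil : ((PySem.Chars.split₀ (PySem.Chars.strip q)).map PySem.Chars.strip).filter
        (fun w => !w.isEmpty) = PySem.Chars.split₀ q := by
    rw [hmap]
    apply List.filter_eq_self.mpr
    intro w hw
    simpa [List.isEmpty_iff] using (hwords w hw).1
  have htok : PySem.Chars.split₀
      (q.filter (fun c => PySem.Chars.isalnum c || PySem.Chars.isspace c))
      = ((PySem.Chars.split₀ q).map (fun w => w.filter PySem.Chars.isalnum)).filter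
          (fun w => !w.isEmpty) := by
    have h0 := go_filter q []
    simpa [PySem.Chars.split₀] using h0
  simp only [hfil, htok, escaped_foldl, List.nil_append]
  by_cases hs : (PySem.Chars.strip q).isEmpty = true
  · have hnil : PySem.Chars.split₀ q = [] := by
      rw [← split₀_strip, List.isEmpty_iff.mp hs]
      simp [PySem.Chars.split₀, PySem.Chars.split₀.go]
    simp [hs, hnil]
  · rw [Bool.not_eq_true] at hs
    simp only [hs, Bool.false_eq_true, if_false]
    by_cases hw : (PySem.Chars.split₀ q).isEmpty = true
    · simp [List.isEmpty_iff.mp hw]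
    · rw [Bool.not_eq_true] at hw
      simp [hw]
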